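-- pv_equiv track=rewrite | github.com/winatecommerce96/emailpilot-app | email-sms-mcp-server.deprecated/enhanced_server.py | _define_kpis
-- ===== SOURCE A (Python) =====
-- from typing import Any, Dict, List, Optional
--
-- def _define_kpis(objectives: List[str]) -> List[Dict]:
--     kpis = []
--     for obj in objectives:
--         if "sales" in obj:
--             kpis.append({"metric": "revenue", "target": "+20%", "timeframe": "30_days"})
--         elif "engagement" in obj:
--             kpis.append({"metric": "click_rate", "target": ">5%", "timeframe": "campaign"})
--         elif "retention" in obj:
--             kpis.append({"metric": "churn_rate", "target": "<2%", "timeframe": "90_days"})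
--     return kpis
-- ===== SOURCE B (Python) =====
-- _KPI_TABLE = [
--     ("sales", {"metric": "revenue", "target": "+20%", "timeframe": "30_days"}),
--     ("engagement", {"metric": "click_rate", "target": ">5%", "timeframe": "campaign"}),
--     ("retention", {"metric": "churn_rate", "target": "<2%", "timeframe": "90_days"}),
-- ]
--
-- def _define_kpis(objectives):
--     # keyword-major: one full pass over the objectives per keyword, in reverse
--     # priority order so a higher-priority keyword overwrites the slot later;
--     # then a final compaction pass drops the unmatched slots.
--     picked = [None] * len(objectives)
--     for kw, kpi in reversed(_KPI_TABLE):
--         for i, obj in enumerate(objectives):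
--             if kw in obj:
--                 picked[i] = kpi
--     return [dict(p) for p in picked if p is not None]
-- ===== Notes on version B (the rewrite author's own statement) =====
-- stated objective: alternative
-- what changed: Inverts the loop nesting: instead of scanning the keywords inside a per-objective if/elif chain, B makes one keyword-major pass over all objectives per keyword in reverse priority order, writing into a per-objective slot array so higher-priority keywords overwrite, then compacts the slots.
import Mathlib
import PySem

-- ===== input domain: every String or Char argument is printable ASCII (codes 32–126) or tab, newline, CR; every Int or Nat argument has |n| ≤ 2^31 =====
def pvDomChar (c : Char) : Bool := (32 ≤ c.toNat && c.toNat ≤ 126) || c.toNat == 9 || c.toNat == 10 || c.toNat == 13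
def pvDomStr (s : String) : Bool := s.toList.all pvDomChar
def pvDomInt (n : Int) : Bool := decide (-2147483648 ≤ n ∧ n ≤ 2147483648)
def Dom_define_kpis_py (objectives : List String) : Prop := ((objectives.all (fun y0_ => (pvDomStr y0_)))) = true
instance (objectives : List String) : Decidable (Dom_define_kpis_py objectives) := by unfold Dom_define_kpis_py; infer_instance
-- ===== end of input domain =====

-- B inverts the loop nesting: keyword-major passes in reverse priority order into a slot array, then compaction (alternative, same cost).
-- ===== PORT A =====
def pvSalesKpi : List (String × String) := [("metric", "revenue"), ("target", "+20%"), ("timeframe", "30_days")]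
def pvEngKpi : List (String × String) := [("metric", "click_rate"), ("target", ">5%"), ("timeframe", "campaign")]
def pvRetKpi : List (String × String) := [("metric", "churn_rate"), ("target", "<2%"), ("timeframe", "90_days")]

def define_kpis_py (objectives : List String) : List (List (String × String)) :=
  objectives.foldl (fun kpis obj =>
    if PySem.Str.isIn "sales" obj then kpis ++ [pvSalesKpi]
    else if PySem.Str.isIn "engagement" obj then kpis ++ [pvEngKpi]
    else if PySem.Str.isIn "retention" obj then kpis ++ [pvRetKpi]
    else kpis) []

-- ===== PORT B =====
-- B: for each keyword (reverse priority order), one pass over all objectives writing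
-- its KPI into the matching slots (overwriting), then a compaction pass drops empty slots.
def pvKpiTable : List (String × List (String × String)) :=
  [("sales", pvSalesKpi), ("engagement", pvEngKpi), ("retention", pvRetKpi)]

def define_kpis_py_alt (objectives : List String) : List (List (String × String)) :=
  let picked := pvKpiTable.reverse.foldl
    (fun picked p =>
      (objectives.zip picked).map
        (fun op => if PySem.Str.isIn p.1 op.1 then some p.2 else op.2))
    (objectives.map (fun _ => (none : Option (List (String × String)))))
  picked.filterMap id

-- ===== PRECONDITION & SPEC =====
def Spec_define_kpis_py (objectives : List String) (out : List (List (String × String))) : Prop := out = define_kpis_py_alt objectives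
instance (objectives : List String) (out : List (List (String × String))) : Decidable (Spec_define_kpis_py objectives out) := by unfold Spec_define_kpis_py; infer_instance

-- ===== CLAIM (what is proved, stated in full; the proofs are below) =====
def Claim_equal_define_kpis_py : Prop := ∀ (objectives : List String), Dom_define_kpis_py objectives → Spec_define_kpis_py objectives (define_kpis_py objectives)

-- ===== LEMMAS AND PROOFS =====

-- one keyword-major pass over slots that are a pointwise function of the objectives
theorem pv_pass (objs : List String) (f : String → Option (List (String × String)))
    (kw : String) (kpi : List (String × String)) :
    ((objs.zip (objs.map f)).map
      (fun op => if PySem.Str.isIn kw op.1 then some kpi else op.2)) =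
    objs.map (fun o => if PySem.Str.isIn kw o then some kpi else f o) := by
  induction objs with
  | nil => rfl
  | cons o t ih => rw [List.map_cons, List.zip_cons_cons, List.map_cons, ih]; rfl

-- the slot array after all three passes
theorem pv_picked (objs : List String) :
    pvKpiTable.reverse.foldl
      (fun picked p =>
        (objs.zip picked).map
          (fun op => if PySem.Str.isIn p.1 op.1 then some p.2 else op.2))
      (objs.map (fun _ => (none : Option (List (String × String))))) =
    objs.map (fun o =>
      if PySem.Str.isIn "sales" o then some pvSalesKpi
      else if PySem.Str.isIn "engagement" o then some pvEngKpi
      else if PySem.Str.isIn "retention" o then some pvRetKpi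
      else none) := by
  simp only [pvKpiTable, List.reverse, List.reverseAux, List.foldl]
  rw [pv_pass, pv_pass, pv_pass]

-- A's fold equals the compaction of the slot array
theorem pv_loop (objs : List String) (acc : List (List (String × String))) :
    objs.foldl (fun kpis obj =>
      if PySem.Str.isIn "sales" obj then kpis ++ [pvSalesKpi]
      else if PySem.Str.isIn "engagement" obj then kpis ++ [pvEngKpi]
      else if PySem.Str.isIn "retention" obj then kpis ++ [pvRetKpi]
      else kpis) acc =
    acc ++ (objs.map (fun o =>
      if PySem.Str.isIn "sales" o then some pvSalesKpi
      else if PySem.Str.isIn "engagement" o then some pvEngKpi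
      else if PySem.Str.isIn "retention" o then some pvRetKpi
      else none)).filterMap id := by
  induction objs generalizing acc with
  | nil => simp
  | cons o t ih =>
    simp only [List.foldl, List.map_cons, List.filterMap_cons]
    rw [ih]
    split_ifs <;> simp

-- ===== VERDICT (by name: the statement is the Claim_ definition above) =====
theorem define_kpis_py_spec : Claim_equal_define_kpis_py := by
  intro objectives _
  unfold Spec_define_kpis_py define_kpis_py define_kpis_py_alt
  rw [pv_picked, pv_loop, List.nil_append]
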